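-- pv_equiv track=rewrite | github.com/esmel200/analysis_lsp | citizen_level_analysis_exclude_all_pursuits/src/analyze_race_distribution_by_year.py | get_trend_arrow
-- ===== SOURCE A (Python) =====
-- def get_trend_arrow(values):
--     """Return trend indicator based on year-over-year changes."""
--     if len(values) < 2:
--         return ''
--     changes = [values[i+1] - values[i] for i in range(len(values)-1)]
--     if all(c > 0 for c in changes):
--         return '↑'
--     elif all(c < 0 for c in changes):
--         return '↓'
--     elif all(c == 0 for c in changes):
--         return '→'
--     else:
--         return '~'
-- ===== SOURCE B (Python) =====
-- def get_trend_arrow(values):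
--     """Return trend indicator based on year-over-year changes."""
--     if len(values) < 2:
--         return ''
--     steps = {'↑' if b > a else '↓' if b < a else '→' for a, b in zip(values, values[1:])}
--     return steps.pop() if len(steps) == 1 else '~'
-- ===== Notes on version B (the rewrite author's own statement) =====
-- stated objective: simpler
-- what changed: Instead of building a list of numeric differences and scanning it with three all() passes, B classifies each adjacent pair directly into its arrow symbol, collects the distinct symbols in a set, and returns the unique symbol if the set is a singleton, else '~'.
import Mathlib
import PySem

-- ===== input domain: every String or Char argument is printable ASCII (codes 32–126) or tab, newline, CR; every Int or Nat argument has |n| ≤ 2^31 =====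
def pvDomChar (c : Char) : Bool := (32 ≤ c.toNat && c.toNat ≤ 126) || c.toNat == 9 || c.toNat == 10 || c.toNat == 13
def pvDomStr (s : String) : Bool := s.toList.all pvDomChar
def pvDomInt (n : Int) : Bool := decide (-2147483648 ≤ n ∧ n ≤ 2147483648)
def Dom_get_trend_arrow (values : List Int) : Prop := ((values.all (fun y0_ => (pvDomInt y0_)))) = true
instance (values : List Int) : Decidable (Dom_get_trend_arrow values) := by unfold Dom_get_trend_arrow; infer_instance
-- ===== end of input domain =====

-- B classifies each adjacent pair directly into its arrow symbol and collects the distinct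
-- symbols in a set, returning the unique symbol (set.pop() of the singleton) or '~';
-- objective: simpler (no intermediate list of differences, no three all() scans).

-- ===== PORT A =====
def get_trend_arrow (values : List Int) : String :=
  if values.length < 2 then "" else
  let changes := (PySem.List.pyRange 0 ((values.length : Int) - 1) 1).map
    (fun i => PySem.List.pyGetD values (i + 1) 0 - PySem.List.pyGetD values i 0)
  if changes.all (fun c => decide (c > 0)) then "↑"
  else if changes.all (fun c => decide (c < 0)) then "↓"
  else if changes.all (fun c => decide (c = 0)) then "→"
  else "~"

-- ===== PORT B =====
def get_trend_arrow_alt (values : List Int) : String :=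
  if values.length < 2 then "" else
  let steps : PySem.Set String := PySem.Set.ofList
    ((values.zip (PySem.List.slice values (some 1) none)).map
      (fun p => if p.1 < p.2 then "↑" else if p.2 < p.1 then "↓" else "→"))
  -- steps.pop() on the guarded singleton set is its unique element (headD's default is unreachable)
  if steps.length = 1 then steps.headD "" else "~"

-- ===== PRECONDITION & SPEC =====
def Spec_get_trend_arrow (values : List Int) (out : String) : Prop := out = get_trend_arrow_alt values
instance (values : List Int) (out : String) : Decidable (Spec_get_trend_arrow values out) := by unfold Spec_get_trend_arrow; infer_instance

-- ===== CLAIM (what is proved, stated in full; the proofs are below) =====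
def Claim_equal_get_trend_arrow : Prop := ∀ (values : List Int), Dom_get_trend_arrow values → Spec_get_trend_arrow values (get_trend_arrow values)

-- ===== LEMMAS AND PROOFS =====

/-- Folding `Set.add` over elements already in the accumulator is the identity. -/
theorem foldl_add_of_mem {α : Type} [BEq α] [LawfulBEq α] :
    ∀ (M : List α) (s : PySem.Set α), (∀ y ∈ M, y ∈ s) → M.foldl PySem.Set.add s = s := by
  intro M
  induction M with
  | nil => intro s _; rfl
  | cons x xs ih =>
    intro s h
    have hx : x ∈ s := h x (List.mem_cons_self)
    have hadd : PySem.Set.add s x = s := by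
      simp [PySem.Set.add, PySem.Set.contains, hx]
    rw [List.foldl_cons, hadd]
    exact ih s (fun y hy => h y (List.mem_cons_of_mem _ hy))

/-- set(M) of a nonempty constant list is the singleton. -/
theorem ofList_const {α : Type} [BEq α] [LawfulBEq α] (M : List α) (x : α)
    (hne : M ≠ []) (hall : ∀ y ∈ M, y = x) : PySem.Set.ofList M = [x] := by
  rcases M with _ | ⟨a, rest⟩
  · exact absurd rfl hne
  · have ha : a = x := hall a List.mem_cons_self
    subst ha
    rw [PySem.Set.ofList_eq_foldl, List.foldl_cons]
    have h1 : PySem.Set.add ([] : PySem.Set α) a = [a] := by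
      simp [PySem.Set.add, PySem.Set.contains]
    rw [h1]
    exact foldl_add_of_mem rest [a]
      (fun y hy => by simp [hall y (List.mem_cons_of_mem _ hy)])

/-- A list containing two distinct elements does not have length 1. -/
theorem len_ne_one_of_two_mem {α : Type} (s : List α) (x y : α)
    (hx : x ∈ s) (hy : y ∈ s) (hxy : x ≠ y) : s.length ≠ 1 := by
  intro hlen
  rcases s with _ | ⟨a, rest⟩
  · simp at hx
  · have : rest = [] := by simpa using hlen
    subst this
    simp at hx hy
    exact hxy (hx.trans hy.symm)

/-- A's list of consecutive differences equals the zip-pair differences of B's traversal. -/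
theorem changes_eq_zip (values : List Int) :
    (PySem.List.pyRange 0 ((values.length : Int) - 1) 1).map
      (fun i => PySem.List.pyGetD values (i + 1) 0 - PySem.List.pyGetD values i 0)
    = (values.zip values.tail).map (fun p => p.2 - p.1) := by
  apply List.ext_getElem
  · simp [PySem.List.length_pyRange_one]
    try omega
  · intro k h1 h2
    simp only [List.getElem_map, PySem.List.getElem_pyRange_one, zero_add]
    have hk : k < values.length - 1 := by
      simp [PySem.List.length_pyRange_one] at h1; omega
    have hzip : (values.zip values.tail)[k]'(by simpa using h2)
        = (values[k]'(by omega), values.tail[k]'(by simp; omega)) := by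
      simp
    rw [hzip]
    have htail : values.tail[k]'(by simp; omega) = values[k+1]'(by omega) := by
      simp [List.getElem_tail]
    have hget1 : PySem.List.pyGetD values ((k : Int) + 1) 0 = values[k+1]'(by omega) := by
      have hcast : ((k : Int) + 1) = ((k + 1 : Nat) : Int) := by push_cast; ring
      rw [hcast, PySem.List.pyGetD_natCast]
      simp [List.getD, List.getElem?_eq_getElem (by omega : k + 1 < values.length)]
    have hget0 : PySem.List.pyGetD values ((k : Int)) 0 = values[k]'(by omega) := by
      rw [PySem.List.pyGetD_natCast]
      simp [List.getD, List.getElem?_eq_getElem (by omega : k < values.length)]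
    rw [hget1, hget0, htail]

-- ===== VERDICT (by name: the statement is the Claim_ definition above) =====
theorem get_trend_arrow_spec : Claim_equal_get_trend_arrow := by
  intro values _
  unfold Spec_get_trend_arrow get_trend_arrow get_trend_arrow_alt
  by_cases hlen : values.length < 2
  · simp [hlen]
  · simp only [hlen, if_false]
    rw [PySem.List.slice_from_one, changes_eq_zip]
    set P := values.zip values.tail with hP
    have hPlen : P.length = values.length - 1 := by
      rw [hP]; simp
      try omega
    set L := P.map (fun p => p.2 - p.1) with hL
    set M := P.map (fun p : Int × Int => if p.1 < p.2 then "↑" else if p.2 < p.1 then "↓" else "→") with hM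
    have hML : M = L.map (fun c => if c > 0 then "↑" else if c < 0 then "↓" else "→") := by
      rw [hM, hL, List.map_map]
      apply List.map_congr_left
      intro p _
      by_cases hc1 : p.1 < p.2
      · simp only [Function.comp]
        rw [if_pos hc1, if_pos (by omega : p.2 - p.1 > 0)]
      · by_cases hc2 : p.2 < p.1
        · simp only [Function.comp]
          rw [if_neg hc1, if_pos hc2, if_neg (by omega : ¬ p.2 - p.1 > 0),
            if_pos (by omega : p.2 - p.1 < 0)]
        · simp only [Function.comp]
          rw [if_neg hc1, if_neg hc2, if_neg (by omega : ¬ p.2 - p.1 > 0),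
            if_neg (by omega : ¬ p.2 - p.1 < 0)]
    have hLne : L ≠ [] := by
      rw [hL]
      intro he
      have := congrArg List.length he
      simp [hPlen] at this
      omega
    have hMne : M ≠ [] := by
      rw [hML]
      intro he
      exact hLne (by simpa using he)
    by_cases h1 : L.all (fun c => decide (c > 0))
    · have hset : PySem.Set.ofList M = ["↑"] := by
        apply ofList_const _ _ hMne
        intro y hy
        rw [hML] at hy
        rcases List.mem_map.mp hy with ⟨c, hc, rfl⟩
        have : c > 0 := by simpa using List.all_eq_true.mp h1 c hc
        simp [this]
      simp [h1, hset]
    · by_cases h2 : L.all (fun c => decide (c < 0))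
      · have hset : PySem.Set.ofList M = ["↓"] := by
          apply ofList_const _ _ hMne
          intro y hy
          rw [hML] at hy
          rcases List.mem_map.mp hy with ⟨c, hc, rfl⟩
          have hc0 : c < 0 := by simpa using List.all_eq_true.mp h2 c hc
          rw [if_neg (by omega : ¬ c > 0), if_pos hc0]
        simp [h1, h2, hset]
      · by_cases h3 : L.all (fun c => decide (c = 0))
        · have hset : PySem.Set.ofList M = ["→"] := by
            apply ofList_const _ _ hMne
            intro y hy
            rw [hML] at hy
            rcases List.mem_map.mp hy with ⟨c, hc, rfl⟩
            have hc0 : c = 0 := by simpa using List.all_eq_true.mp h3 c hc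
            rw [if_neg (by omega : ¬ c > 0), if_neg (by omega : ¬ c < 0)]
          simp [h1, h2, h3, hset]
        · -- mixed: the set contains two distinct arrows, so its length is not 1
          have hne1 : (PySem.Set.ofList M).length ≠ 1 := by
            have arrow_mem : ∀ c ∈ L,
                (if c > 0 then "↑" else if c < 0 then "↓" else "→") ∈ PySem.Set.ofList M := by
              intro c hc
              rw [PySem.Set.mem_ofList, hML]
              exact List.mem_map_of_mem hc
            rcases List.exists_mem_of_ne_nil L hLne with ⟨_, _⟩
            obtain ⟨c, hc, hcne⟩ : ∃ c ∈ L, ¬ c = 0 := by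
              by_contra hcon
              push_neg at hcon
              exact h3 (List.all_eq_true.mpr (fun c hc => by simpa using hcon c hc))
            by_cases hcpos : c > 0
            · obtain ⟨d, hd, hdle⟩ : ∃ d ∈ L, ¬ d > 0 := by
                by_contra hcon
                push_neg at hcon
                exact h1 (List.all_eq_true.mpr (fun d hd => by simpa using hcon d hd))
              have hxc := arrow_mem c hc
              have hxd := arrow_mem d hd
              rw [if_pos hcpos] at hxc
              rw [if_neg hdle] at hxd
              by_cases hdneg : d < 0
              · rw [if_pos hdneg] at hxd
                exact len_ne_one_of_two_mem _ _ _ hxc hxd (by decide)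
              · rw [if_neg hdneg] at hxd
                exact len_ne_one_of_two_mem _ _ _ hxc hxd (by decide)
            · have hcneg : c < 0 := by omega
              obtain ⟨e, he, hege⟩ : ∃ e ∈ L, ¬ e < 0 := by
                by_contra hcon
                push_neg at hcon
                exact h2 (List.all_eq_true.mpr (fun e he => by simpa using hcon e he))
              have hxc := arrow_mem c hc
              have hxe := arrow_mem e he
              rw [if_neg hcpos, if_pos hcneg] at hxc
              by_cases hepos : e > 0
              · rw [if_pos hepos] at hxe
                exact len_ne_one_of_two_mem _ _ _ hxc hxe (by decide)
              · rw [if_neg hepos, if_neg hege] at hxe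
                exact len_ne_one_of_two_mem _ _ _ hxc hxe (by decide)
          simp only [h1, h2, h3, if_false, Bool.false_eq_true]
          rw [if_neg hne1]
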